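-- pv_equiv track=rewrite | github.com/scarusillo/scottys-edge | scripts/grader.py | _market_key
-- ===== SOURCE A (Python) =====
-- def _market_key(market_type, selection=''):
--     """Map our market_type to the odds table market key.
--
--     For props, we need to determine the specific market from the selection text.
--     Selections look like: "LeBron James OVER 25.5 POINTS"
--     """
--     if market_type == 'PROP':
--         sel_upper = (selection or '').upper()
--         # Match against all prop labels (same mapping as props_engine.PROP_LABEL)
--         PROP_MARKET_MAP = {
--             'POINTS': 'player_points', 'REBOUNDS': 'player_rebounds',
--             'ASSISTS': 'player_assists', 'THREES': 'player_threes',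
--             'BLOCKS': 'player_blocks', 'STEALS': 'player_steals',
--             'SOG': 'player_shots_on_goal', 'PPP': 'player_power_play_points',
--             'BLK_SHOTS': 'player_blocked_shots',
--             'SHOTS': 'player_shots', 'SOT': 'player_shots_on_target',
--             'HITS': 'batter_hits', 'TOTAL_BASES': 'batter_total_bases',
--             'HOME_RUNS': 'batter_home_runs', 'RBIS': 'batter_rbis',
--             'RUNS': 'batter_runs_scored', 'STRIKEOUTS': 'pitcher_strikeouts',
--             'OUTS': 'pitcher_outs', 'HITS ALLOWED': 'pitcher_hits_allowed',
--             'EARNED RUNS': 'pitcher_earned_runs', 'WALKS': 'pitcher_bb',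
--             'STOLEN_BASES': 'batter_stolen_bases',
--         }
--         # Sort by key length descending so 'HITS ALLOWED' matches before 'HITS',
--         # 'EARNED RUNS' before 'RUNS', etc.
--         for label, market in sorted(PROP_MARKET_MAP.items(), key=lambda x: -len(x[0])):
--             if label in sel_upper:
--                 return market
--         return 'player_points'  # Default fallback
--
--     return {
--         'SPREAD': 'spreads',
--         'MONEYLINE': 'h2h',
--         'TOTAL': 'totals',
--     }.get(market_type, 'h2h')
-- ===== SOURCE B (Python) =====
-- # Single pass over the prop-label table keeping the longest matching label
-- # (strict '>' in insertion order reproduces the stable sort's tie-breaking);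
-- # the non-PROP mapping becomes a plain conditional chain.
--
-- PROP_MARKETS = [
--     ('POINTS', 'player_points'), ('REBOUNDS', 'player_rebounds'),
--     ('ASSISTS', 'player_assists'), ('THREES', 'player_threes'),
--     ('BLOCKS', 'player_blocks'), ('STEALS', 'player_steals'),
--     ('SOG', 'player_shots_on_goal'), ('PPP', 'player_power_play_points'),
--     ('BLK_SHOTS', 'player_blocked_shots'),
--     ('SHOTS', 'player_shots'), ('SOT', 'player_shots_on_target'),
--     ('HITS', 'batter_hits'), ('TOTAL_BASES', 'batter_total_bases'),
--     ('HOME_RUNS', 'batter_home_runs'), ('RBIS', 'batter_rbis'),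
--     ('RUNS', 'batter_runs_scored'), ('STRIKEOUTS', 'pitcher_strikeouts'),
--     ('OUTS', 'pitcher_outs'), ('HITS ALLOWED', 'pitcher_hits_allowed'),
--     ('EARNED RUNS', 'pitcher_earned_runs'), ('WALKS', 'pitcher_bb'),
--     ('STOLEN_BASES', 'batter_stolen_bases'),
-- ]
--
--
-- def _market_key(market_type, selection=''):
--     if market_type != 'PROP':
--         if market_type == 'SPREAD':
--             return 'spreads'
--         if market_type == 'TOTAL':
--             return 'totals'
--         return 'h2h'  # MONEYLINE and anything unknown
--     sel_upper = selection.upper()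
--     best_market, best_len = 'player_points', 0
--     for label, market in PROP_MARKETS:
--         if len(label) > best_len and label in sel_upper:
--             best_market, best_len = market, len(label)
--     return best_market
-- ===== Notes on version B (the rewrite author's own statement) =====
-- stated objective: simpler
-- what changed: The PROP branch no longer sorts the label table by descending length and returns the first hit; B makes one pass over the table in insertion order keeping the longest matching label (strict '>' reproduces the stable sort's tie-break), and the non-PROP dict lookup becomes a plain conditional chain.
import Mathlib
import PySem

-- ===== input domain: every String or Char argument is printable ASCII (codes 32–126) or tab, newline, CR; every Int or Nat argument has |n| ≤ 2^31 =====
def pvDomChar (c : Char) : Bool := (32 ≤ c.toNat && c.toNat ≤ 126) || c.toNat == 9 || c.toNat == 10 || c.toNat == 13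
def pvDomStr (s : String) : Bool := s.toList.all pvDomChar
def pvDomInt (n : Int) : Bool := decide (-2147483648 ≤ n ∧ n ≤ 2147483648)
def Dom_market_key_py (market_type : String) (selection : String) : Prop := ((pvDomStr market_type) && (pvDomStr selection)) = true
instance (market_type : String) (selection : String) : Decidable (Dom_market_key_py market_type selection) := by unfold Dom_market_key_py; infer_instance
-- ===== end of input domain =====

-- B replaces A's sort-then-first-hit prop lookup by a single pass keeping the
-- longest matching label (objective: simpler — no sort).

-- The prop label/market pairs in dict-insertion order (shared data table).
def propPairs : List (String × String) :=
  [("POINTS", "player_points"), ("REBOUNDS", "player_rebounds"),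
   ("ASSISTS", "player_assists"), ("THREES", "player_threes"),
   ("BLOCKS", "player_blocks"), ("STEALS", "player_steals"),
   ("SOG", "player_shots_on_goal"), ("PPP", "player_power_play_points"),
   ("BLK_SHOTS", "player_blocked_shots"),
   ("SHOTS", "player_shots"), ("SOT", "player_shots_on_target"),
   ("HITS", "batter_hits"), ("TOTAL_BASES", "batter_total_bases"),
   ("HOME_RUNS", "batter_home_runs"), ("RBIS", "batter_rbis"),
   ("RUNS", "batter_runs_scored"), ("STRIKEOUTS", "pitcher_strikeouts"),
   ("OUTS", "pitcher_outs"), ("HITS ALLOWED", "pitcher_hits_allowed"),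
   ("EARNED RUNS", "pitcher_earned_runs"), ("WALKS", "pitcher_bb"),
   ("STOLEN_BASES", "batter_stolen_bases")]

-- ===== PORT A =====
-- the 'for label, market in …: if label in sel_upper: return market' loop
def aPropLoop (su : String) : List (String × String) → String
  | [] => "player_points"
  | (label, market) :: rest =>
    if PySem.Str.isIn label su then market else aPropLoop su rest

def market_key_py (market_type : String) (selection : String) : String :=
  if market_type = "PROP" then
    let sel_upper := PySem.Str.upper (if selection = "" then "" else selection)
    aPropLoop sel_upper
      (PySem.List.sorted (PySem.Dict.ofList propPairs).items
        (fun x => -(PySem.Str.len x.1)) false)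
  else
    (PySem.Dict.ofList
      [("SPREAD", "spreads"), ("MONEYLINE", "h2h"), ("TOTAL", "totals")]).getD
      market_type "h2h"

-- ===== PORT B =====
-- one fold step: adopt (market, len) when the label is a strictly longer match
def bStep (su : String) (st : String × Int) (x : String × String) : String × Int :=
  if PySem.Str.len x.1 > st.2 && PySem.Str.isIn x.1 su then (x.2, PySem.Str.len x.1) else st

def market_key_py_alt (market_type : String) (selection : String) : String :=
  if market_type ≠ "PROP" then
    if market_type = "SPREAD" then "spreads"
    else if market_type = "TOTAL" then "totals"
    else "h2h"
  else
    (propPairs.foldl (bStep (PySem.Str.upper selection)) ("player_points", 0)).1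

-- ===== PRECONDITION & SPEC =====
def Spec_market_key_py (market_type : String) (selection : String) (out : String) : Prop := out = market_key_py_alt market_type selection
instance (market_type : String) (selection : String) (out : String) : Decidable (Spec_market_key_py market_type selection out) := by unfold Spec_market_key_py; infer_instance

-- ===== CLAIM (what is proved, stated in full; the proofs are below) =====
def Claim_equal_market_key_py : Prop := ∀ (market_type : String) (selection : String), Dom_market_key_py market_type selection → Spec_market_key_py market_type selection (market_key_py market_type selection)

-- ===== LEMMAS AND PROOFS =====

def slen (x : String × String) : Int := PySem.Str.len x.1

-- propPairs stably sorted by descending label length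
def sortedPairs : List (String × String) :=
  [("HITS ALLOWED", "pitcher_hits_allowed"), ("STOLEN_BASES", "batter_stolen_bases"),
   ("TOTAL_BASES", "batter_total_bases"), ("EARNED RUNS", "pitcher_earned_runs"),
   ("STRIKEOUTS", "pitcher_strikeouts"), ("BLK_SHOTS", "player_blocked_shots"),
   ("HOME_RUNS", "batter_home_runs"), ("REBOUNDS", "player_rebounds"),
   ("ASSISTS", "player_assists"), ("POINTS", "player_points"),
   ("THREES", "player_threes"), ("BLOCKS", "player_blocks"),
   ("STEALS", "player_steals"), ("SHOTS", "player_shots"),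
   ("WALKS", "pitcher_bb"), ("HITS", "batter_hits"),
   ("RBIS", "batter_rbis"), ("RUNS", "batter_runs_scored"),
   ("OUTS", "pitcher_outs"), ("SOG", "player_shots_on_goal"),
   ("PPP", "player_power_play_points"), ("SOT", "player_shots_on_target")]

lemma sorted_prop :
    PySem.List.sorted (PySem.Dict.ofList propPairs).items
      (fun x => -(PySem.Str.len x.1)) false = sortedPairs := by decide

-- generic fold step (bStep with the membership test abstracted to q)
def gstep (q : String × String → Bool) (st : String × Int) (x : String × String) : String × Int :=
  if slen x > st.2 && q x then (x.2, slen x) else st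

lemma bStep_eq_gstep (su : String) :
    bStep su = gstep (fun x => PySem.Str.isIn x.1 su) := rfl

lemma aPropLoop_eq_find? (su : String) (L : List (String × String)) :
    aPropLoop su L = ((L.find? (fun x => PySem.Str.isIn x.1 su)).map Prod.snd).getD "player_points" := by
  induction L with
  | nil => rfl
  | cons x rest ih =>
    obtain ⟨l, m⟩ := x
    cases hc : PySem.Chars.isIn l.toList su.toList <;>
      simp [aPropLoop, PySem.Str.isIn, hc, ih]

lemma fold_filter (q : String × String → Bool) (L : List (String × String)) (st : String × Int) :
    L.foldl (gstep q) st = (L.filter q).foldl (gstep q) st := by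
  induction L generalizing st with
  | nil => rfl
  | cons x rest ih =>
    by_cases h : q x
    · simp [h, List.foldl_cons, ih]
    · simp [h, List.foldl_cons, ih, gstep]

lemma fold_lt (q : String × String → Bool) (M : Int) (L : List (String × String))
    (st : String × Int) (hL : ∀ x ∈ L, slen x < M) (hst : st.2 < M) :
    (L.foldl (gstep q) st).2 < M := by
  induction L generalizing st with
  | nil => exact hst
  | cons x rest ih =>
    simp only [List.foldl_cons]
    have hg : (gstep q st x).2 < M := by
      unfold gstep
      split_ifs with h
      · exact hL x (List.mem_cons_self ..)
      · exact hst
    exact ih _ (fun y hy => hL y (List.mem_cons_of_mem _ hy)) hg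

lemma fold_stuck (q : String × String → Bool) (L : List (String × String))
    (m : String) (n : Int) (hL : ∀ x ∈ L, slen x ≤ n) :
    L.foldl (gstep q) (m, n) = (m, n) := by
  induction L with
  | nil => rfl
  | cons x rest ih =>
    have hx : slen x ≤ n := hL x (List.mem_cons_self ..)
    have : gstep q (m, n) x = (m, n) := by
      unfold gstep
      have : ¬ slen x > n := by omega
      simp [this]
    simp only [List.foldl_cons, this]
    exact ih (fun y hy => hL y (List.mem_cons_of_mem _ hy))

lemma lens_bound : ∀ x ∈ propPairs, slen x = 3 ∨ slen x = 4 ∨ slen x = 5 ∨ slen x = 6 ∨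
    slen x = 7 ∨ slen x = 8 ∨ slen x = 9 ∨ slen x = 10 ∨ slen x = 11 ∨ slen x = 12 := by decide

lemma lens_bound_sorted : ∀ x ∈ sortedPairs, slen x = 3 ∨ slen x = 4 ∨ slen x = 5 ∨ slen x = 6 ∨
    slen x = 7 ∨ slen x = 8 ∨ slen x = 9 ∨ slen x = 10 ∨ slen x = 11 ∨ slen x = 12 := by decide

-- stability of the sort, per length class: each length class keeps its order
lemma class_eq (n : Int) :
    propPairs.filter (fun x => decide (slen x = n)) =
    sortedPairs.filter (fun x => decide (slen x = n)) := by
  by_cases h3 : n = 3;  · subst h3; decide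
  by_cases h4 : n = 4;  · subst h4; decide
  by_cases h5 : n = 5;  · subst h5; decide
  by_cases h6 : n = 6;  · subst h6; decide
  by_cases h7 : n = 7;  · subst h7; decide
  by_cases h8 : n = 8;  · subst h8; decide
  by_cases h9 : n = 9;  · subst h9; decide
  by_cases h10 : n = 10; · subst h10; decide
  by_cases h11 : n = 11; · subst h11; decide
  by_cases h12 : n = 12; · subst h12; decide
  rw [List.filter_eq_nil_iff.mpr, List.filter_eq_nil_iff.mpr]
  · intro x hx
    have := lens_bound_sorted x hx
    simp only [decide_eq_true_eq]
    omega
  · intro x hx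
    have := lens_bound x hx
    simp only [decide_eq_true_eq]
    omega

lemma perm_TS : sortedPairs.Perm propPairs := by
  have h := PySem.List.sorted_perm (PySem.Dict.ofList propPairs).items
    (fun x => -(PySem.Str.len x.1)) false
  rw [sorted_prop] at h
  have hitems : (PySem.Dict.ofList propPairs).items = propPairs := by decide
  rwa [hitems] at h

lemma mem_iff (x : String × String) : x ∈ propPairs ↔ x ∈ sortedPairs :=
  (perm_TS.mem_iff).symm

lemma sorted_desc : sortedPairs.Pairwise (fun a b => slen b ≤ slen a) := by decide

lemma sorted_pos : ∀ x ∈ sortedPairs, 0 < slen x := by decide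

-- main lemma for the PROP branch: first hit in the sorted list = longest hit in order
lemma prop_main (q : String × String → Bool) :
    ((sortedPairs.find? q).map Prod.snd).getD "player_points" =
    (propPairs.foldl (gstep q) ("player_points", 0)).1 := by
  rw [fold_filter, ← List.head?_filter]
  cases hS' : sortedPairs.filter q with
  | nil =>
    have hT' : propPairs.filter q = [] := by
      rw [List.filter_eq_nil_iff]
      intro x hx hq
      have : x ∈ sortedPairs.filter q := List.mem_filter.mpr ⟨(mem_iff x).mp hx, hq⟩
      simp [hS'] at this
    simp [hT']
  | cons s rest =>
    have hsS' : s ∈ sortedPairs.filter q := by rw [hS']; exact List.mem_cons_self ..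
    have hsS : s ∈ sortedPairs := List.mem_of_mem_filter hsS'
    have hqs : q s = true := List.of_mem_filter hsS'
    have hub_S' : ∀ y ∈ sortedPairs.filter q, slen y ≤ slen s := by
      have hp : (sortedPairs.filter q).Pairwise (fun a b => slen b ≤ slen a) :=
        sorted_desc.filter q
      rw [hS'] at hp
      intro y hy
      rw [hS'] at hy
      rcases List.mem_cons.mp hy with h | h
      · subst h; exact le_refl _
      · exact (List.pairwise_cons.mp hp).1 y h
    have hub_T' : ∀ y ∈ propPairs.filter q, slen y ≤ slen s := by
      intro y hy
      exact hub_S' y (List.mem_filter.mpr ⟨(mem_iff y).mp (List.mem_of_mem_filter hy),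
        List.of_mem_filter hy⟩)
    -- the first length-(slen s) element of propPairs.filter q is s
    have hclass : (propPairs.filter q).filter (fun x => decide (slen x = slen s)) =
        (sortedPairs.filter q).filter (fun x => decide (slen x = slen s)) := by
      rw [List.filter_comm _ q propPairs, class_eq, ← List.filter_comm _ q sortedPairs]
    have hfind : (propPairs.filter q).find? (fun x => decide (slen x = slen s)) = some s := by
      rw [← List.head?_filter, hclass, hS']
      simp
    obtain ⟨hps, u, v, huv, hu⟩ := List.find?_eq_some_iff_append.mp hfind
    have hpos : (0 : Int) < slen s := sorted_pos s hsS
    rw [huv, List.foldl_append, List.foldl_cons]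
    set st := u.foldl (gstep q) ("player_points", 0) with hst
    have hufold : st.2 < slen s := by
      rw [hst]
      apply fold_lt
      · intro x hx
        have hle : slen x ≤ slen s := hub_T' x (by rw [huv]; exact List.mem_append_left _ hx)
        have hne := hu x hx
        simp only [Bool.not_eq_true', decide_eq_false_iff_not] at hne
        omega
      · exact hpos
    have hstep : gstep q st s = (s.2, slen s) := by
      unfold gstep
      split_ifs with h
      · rfl
      · simp only [hqs, Bool.and_true, decide_eq_true_eq] at h
        omega
    rw [hstep, fold_stuck]
    · simp
    · intro y hy
      exact hub_T' y (by rw [huv]; exact List.mem_append_right _ (List.mem_cons_of_mem _ hy))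

lemma getD_three (mt : String) :
    (PySem.Dict.ofList
      [("SPREAD", "spreads"), ("MONEYLINE", "h2h"), ("TOTAL", "totals")]).getD mt "h2h" =
    if mt = "SPREAD" then "spreads" else if mt = "TOTAL" then "totals" else "h2h" := by
  have h : PySem.Dict.ofList [("SPREAD", "spreads"), ("MONEYLINE", "h2h"), ("TOTAL", "totals")] =
      PySem.Dict.mk [("SPREAD", "spreads"), ("MONEYLINE", "h2h"), ("TOTAL", "totals")] := by decide
  rw [h, PySem.Dict.getD_eq_get?_getD, PySem.Dict.get?_mk_cons, PySem.Dict.get?_mk_cons,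
    PySem.Dict.get?_mk_cons]
  by_cases h1 : mt = "SPREAD"
  · subst h1; decide
  by_cases h2 : mt = "MONEYLINE"
  · subst h2; decide
  by_cases h3 : mt = "TOTAL"
  · subst h3; decide
  have n1 : ¬("SPREAD" = mt) := fun e => h1 e.symm
  have n2 : ¬("MONEYLINE" = mt) := fun e => h2 e.symm
  have n3 : ¬("TOTAL" = mt) := fun e => h3 e.symm
  have e0 : (PySem.Dict.mk ([] : List (String × String))).get? mt = none := rfl
  simp [beq_iff_eq, n1, n2, n3, h1, h2, h3, e0]

-- ===== VERDICT (by name: the statement is the Claim_ definition above) =====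
theorem market_key_py_spec : Claim_equal_market_key_py := by
  intro mt sel _
  unfold Spec_market_key_py
  by_cases hmt : mt = "PROP"
  · subst hmt
    simp only [market_key_py, market_key_py_alt]
    have hsel : (if sel = "" then "" else sel) = sel := by
      split_ifs with h
      · rw [h]
      · rfl
    rw [hsel, sorted_prop, aPropLoop_eq_find?, bStep_eq_gstep]
    simpa using prop_main (fun x => PySem.Str.isIn x.1 (PySem.Str.upper sel))
  · simp only [market_key_py, market_key_py_alt, ne_eq, hmt,
      not_false_eq_true, if_pos, if_neg hmt, if_false]
    exact getD_three mt
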